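-- pv_equiv track=rewrite | github.com/rafaelflores-nefadv/nef-ia-api | core/services/provider_models_service.py | _normalize_lookup_key
-- ===== SOURCE A (Python) =====
-- from typing import Any
--
-- def _normalize_lookup_key(value: Any) -> str:
--     raw = str(value or "").strip().lower()
--     if not raw:
--         return ""
--     if raw.startswith("models/"):
--         raw = raw[len("models/") :]
--     raw = (
--         raw.replace("_", "-")
--         .replace(".", "-")
--         .replace(" ", "-")
--         .replace("/", "-")
--     )
--     parts = [part for part in raw.split("-") if part]
--     return "-".join(parts)
-- ===== SOURCE B (Python) =====
-- def _normalize_lookup_key(value) -> str: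
--     raw = str(value or "").strip().lower()
--     if not raw:
--         return ""
--     if raw.startswith("models/"):
--         raw = raw[len("models/"):]
--     parts = []
--     cur = []
--     for c in raw:
--         if c in "-_./ ":
--             if cur:
--                 parts.append("".join(cur))
--                 cur = []
--         else:
--             cur.append(c)
--     if cur:
--         parts.append("".join(cur))
--     return "-".join(parts)
-- ===== Notes on version B (the rewrite author's own statement) =====
-- stated objective: alternative
-- what changed: Replaces the four chained global replace() passes plus split/filter with a single left-to-right pass that tokenizes the string on the five delimiter characters (dash, underscore, dot, slash, space) directly.
import Mathlib
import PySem

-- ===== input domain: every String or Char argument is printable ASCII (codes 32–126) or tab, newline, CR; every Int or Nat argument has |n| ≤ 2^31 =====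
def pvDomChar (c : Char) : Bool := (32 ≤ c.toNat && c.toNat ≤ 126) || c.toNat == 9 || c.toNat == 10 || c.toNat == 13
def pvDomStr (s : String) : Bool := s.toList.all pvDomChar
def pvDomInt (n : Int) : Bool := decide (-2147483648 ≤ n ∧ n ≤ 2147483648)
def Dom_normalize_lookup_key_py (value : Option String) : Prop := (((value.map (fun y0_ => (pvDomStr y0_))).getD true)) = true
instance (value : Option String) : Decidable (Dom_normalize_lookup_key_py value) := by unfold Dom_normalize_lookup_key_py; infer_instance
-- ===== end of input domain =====

-- B replaces A's four chained replace() passes plus split/filter with one single-pass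
-- tokenizer over the five delimiter characters (objective: alternative decomposition).

-- ===== PORT A =====
-- raw = str(value or "").strip().lower()   (shared prelude of both sources)
def nlk_raw (value : Option String) : String :=
  PySem.Str.lower (PySem.Str.strip (value.getD ""))

-- if raw.startswith("models/"): raw = raw[len("models/"):]   (shared by both sources)
def nlk_strip_prefix (raw : String) : String :=
  if PySem.Str.startswith raw "models/" = true then PySem.Str.slice raw (some 7) none else raw

-- A's tail: four chained replaces, split("-"), drop empty parts, join
def nlk_A_tail (raw : String) : String :=
  PySem.Str.join "-"
    (((PySem.Str.split? (PySem.Str.replace (PySem.Str.replace (PySem.Str.replace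
        (PySem.Str.replace raw "_" "-") "." "-") " " "-") "/" "-") "-").getD []).filter
      (fun part => !(part == "")))

def normalize_lookup_key_py (value : Option String) : String :=
  if nlk_raw value = "" then "" else nlk_A_tail (nlk_strip_prefix (nlk_raw value))

-- ===== PORT B =====
def nlk_isDelim (c : Char) : Bool := c == '-' || c == '_' || c == '.' || c == '/' || c == ' '

-- the single for-loop of Source B: cur accumulates the current token, parts the finished ones
def nlk_go : List Char → List Char → List (List Char)
  | [], cur => if cur = [] then [] else [cur]
  | c :: rest, cur =>
      if nlk_isDelim c then
        if cur = [] then nlk_go rest [] else cur :: nlk_go rest []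
      else nlk_go rest (cur ++ [c])

-- B's tail: the one-pass tokenizer, then join
def nlk_B_tail (raw : String) : String :=
  PySem.Str.join "-" ((nlk_go raw.toList []).map String.ofList)

def normalize_lookup_key_py_alt (value : Option String) : String :=
  if nlk_raw value = "" then "" else nlk_B_tail (nlk_strip_prefix (nlk_raw value))

-- ===== PRECONDITION & SPEC =====
def Spec_normalize_lookup_key_py (value : Option String) (out : String) : Prop := out = normalize_lookup_key_py_alt value
instance (value : Option String) (out : String) : Decidable (Spec_normalize_lookup_key_py value out) := by unfold Spec_normalize_lookup_key_py; infer_instance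

-- ===== CLAIM (what is proved, stated in full; the proofs are below) =====
def Claim_equal_normalize_lookup_key_py : Prop := ∀ (value : Option String), Dom_normalize_lookup_key_py value → Spec_normalize_lookup_key_py value (normalize_lookup_key_py value)

-- ===== LEMMAS AND PROOFS =====

-- single-char replace is a pointwise map
theorem nlk_replace_go (o n : Char) :
    ∀ (l acc : List Char) (fuel : Nat), l.length ≤ fuel →
      PySem.Chars.replace.go [o] [n] fuel l acc
        = acc.reverse ++ l.map (fun c => if c = o then n else c) := by
  intro l
  induction l with
  | nil => intro acc fuel _; cases fuel <;> simp [PySem.Chars.replace.go]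
  | cons c t ih =>
      intro acc fuel hf
      cases fuel with
      | zero => simp at hf
      | succ fuel =>
          by_cases h : o = c
          · subst h
            simp [PySem.Chars.replace.go, List.isPrefixOf, ih _ fuel (by simpa using hf)]
          · have h' : ¬ c = o := fun hh => h hh.symm
            have hbeq : (o == c) = false := by simpa using h
            simp [PySem.Chars.replace.go, List.isPrefixOf, hbeq, h',
              ih _ fuel (by simpa using hf)]

theorem nlk_replace_single (o n : Char) (s : List Char) :
    PySem.Chars.replace s [o] [n] = s.map (fun c => if c = o then n else c) := by
  simp [PySem.Chars.replace, nlk_replace_go o n s [] s.length le_rfl]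

-- structural form of splitOn with the single-char separator '-'
def nlk_splitAux : List Char → List Char → List (List Char)
  | [], cur => [cur.reverse]
  | c :: rest, cur => if c = '-' then cur.reverse :: nlk_splitAux rest [] else nlk_splitAux rest (c :: cur)

theorem nlk_splitOn_go :
    ∀ (l cur : List Char) (acc : List (List Char)) (fuel : Nat), l.length < fuel →
      PySem.Chars.splitOn.go ['-'] fuel l cur acc = acc.reverse ++ nlk_splitAux l cur := by
  intro l
  induction l with
  | nil =>
      intro cur acc fuel hf
      cases fuel with
      | zero => simp at hf
      | succ fuel => simp [PySem.Chars.splitOn.go, nlk_splitAux]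
  | cons c rest ih =>
      intro cur acc fuel hf
      cases fuel with
      | zero => simp at hf
      | succ fuel =>
          by_cases h : c = '-'
          · subst h
            simp [PySem.Chars.splitOn.go, List.isPrefixOf, nlk_splitAux,
              ih _ _ fuel (by simpa using hf)]
          · have hbeq : ('-' == c) = false := by
              simpa using fun hh => h hh.symm
            simp [PySem.Chars.splitOn.go, List.isPrefixOf, hbeq, h, nlk_splitAux,
              ih _ _ fuel (by simpa using hf)]

theorem nlk_splitOn_eq (s : List Char) :
    PySem.Chars.splitOn s ['-'] = nlk_splitAux s [] := by
  simpa using nlk_splitOn_go s [] [] (s.length + 1) (by omega)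

-- the composed replacement function of A's four replace passes
theorem nlk_repl_comp (c : Char) :
    (fun c => if c = '/' then '-' else c)
      ((fun c => if c = ' ' then '-' else c)
        ((fun c => if c = '.' then '-' else c)
          ((fun c => if c = '_' then '-' else c) c)))
    = if nlk_isDelim c ∧ c ≠ '-' then '-' else c := by
  by_cases h1 : c = '_' <;> by_cases h2 : c = '.' <;> by_cases h3 : c = ' ' <;>
    by_cases h4 : c = '/' <;> simp_all [nlk_isDelim]

-- core: split('-') on the replaced string, empties dropped, IS the single-pass tokenizer
theorem nlk_core (cs cur : List Char) :
    (nlk_splitAux (cs.map (fun c => if nlk_isDelim c ∧ c ≠ '-' then '-' else c)) cur).filter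
        (fun p => !p.isEmpty)
      = nlk_go cs cur.reverse := by
  induction cs generalizing cur with
  | nil =>
      by_cases h : cur = [] <;>
        simp [nlk_splitAux, nlk_go, h]
  | cons c rest ih =>
      simp only [List.map_cons]
      by_cases hd : nlk_isDelim c = true
      · have hfc : (if nlk_isDelim c = true ∧ c ≠ '-' then '-' else c) = '-' := by
          by_cases hm : c = '-' <;> simp [hd, hm]
        rw [hfc]
        by_cases h : cur = [] <;>
          simp [nlk_splitAux, nlk_go, hd, h, ih []]
      · have hm : c ≠ '-' := by
          intro h; rw [h] at hd; simp [nlk_isDelim] at hd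
        have hfc : (if nlk_isDelim c = true ∧ c ≠ '-' then '-' else c) = c := by simp [hd]
        rw [hfc]
        have hrec := ih (c :: cur)
        simp only [List.reverse_cons] at hrec
        simp [nlk_splitAux, nlk_go, hd, hm, hrec]

theorem nlk_ofList_beq_empty (l : List Char) : (String.ofList l == "") = l.isEmpty := by
  rw [show ("" : String) = String.ofList [] from rfl]
  cases h : l.isEmpty <;> simp_all [List.isEmpty_iff]

-- the whole tail of both ports, for an arbitrary string raw
theorem nlk_tail (raw : String) : nlk_A_tail raw = nlk_B_tail raw := by
  unfold nlk_A_tail nlk_B_tail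
  have hsep : ("-" : String).toList = ['-'] := by decide
  have h1 : ("_" : String).toList = ['_'] := by decide
  have h2 : ("." : String).toList = ['.'] := by decide
  have h3 : (" " : String).toList = [' '] := by decide
  have h4 : ("/" : String).toList = ['/'] := by decide
  have hreplaced : (PySem.Str.replace (PySem.Str.replace (PySem.Str.replace
      (PySem.Str.replace raw "_" "-") "." "-") " " "-") "/" "-").toList
      = raw.toList.map (fun c => if nlk_isDelim c ∧ c ≠ '-' then '-' else c) := by
    simp only [PySem.Str.toList_replace, hsep, h1, h2, h3, h4, nlk_replace_single, List.map_map]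
    exact List.map_congr_left (fun c _ => nlk_repl_comp c)
  rcases hopt : PySem.Str.split? (PySem.Str.replace (PySem.Str.replace (PySem.Str.replace
      (PySem.Str.replace raw "_" "-") "." "-") " " "-") "/" "-") "-" with _ | ps
  · have hm := PySem.Str.split?_map (PySem.Str.replace (PySem.Str.replace (PySem.Str.replace
      (PySem.Str.replace raw "_" "-") "." "-") " " "-") "/" "-") "-"
    rw [hopt, hsep] at hm
    simp [PySem.Chars.split?] at hm
  · have hm := PySem.Str.split?_map (PySem.Str.replace (PySem.Str.replace (PySem.Str.replace
      (PySem.Str.replace raw "_" "-") "." "-") " " "-") "/" "-") "-"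
    rw [hopt, hsep] at hm
    simp only [Option.map_some, PySem.Chars.split?, List.isEmpty_cons, Bool.false_eq_true,
      if_false, Option.some.injEq] at hm
    rw [hreplaced, nlk_splitOn_eq] at hm
    have hps : ps = (nlk_splitAux (raw.toList.map
        (fun c => if nlk_isDelim c ∧ c ≠ '-' then '-' else c)) []).map String.ofList := by
      rw [← hm, List.map_map]
      conv_lhs => rw [← List.map_id ps]
      exact List.map_congr_left (fun p _ => String.ofList_toList.symm)
    have hcore := nlk_core raw.toList []
    simp only [List.reverse_nil] at hcore
    have hpred : ((fun part => !(part == "")) ∘ String.ofList) = fun p => !p.isEmpty := by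
      funext p
      simp [nlk_ofList_beq_empty]
    simp only [Option.getD_some, hps, List.filter_map, hpred, hcore]

-- ===== VERDICT (by name: the statement is the Claim_ definition above) =====
theorem normalize_lookup_key_py_spec : Claim_equal_normalize_lookup_key_py := by
  intro value _
  unfold Spec_normalize_lookup_key_py normalize_lookup_key_py normalize_lookup_key_py_alt
  split_ifs with h
  · rfl
  · exact nlk_tail _
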